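-- pv_equiv track=rewrite | github.com/RustingSword/adventofcode | 2020/07/sol2.py | find_number_of_contained_bags
-- ===== SOURCE A (Python) =====
-- def find_number_of_contained_bags(contains, color):
--     queue = [(1, color)]
--     num_contained_bags = -1  # outer-most bag not counted
--     while True:
--         if not queue:
--             break
--         size = len(queue)
--         for _ in range(size):
--             num_outer, color_outer = queue.pop(0)
--             num_contained_bags += num_outer
--             if color_outer not in contains:
--                 continue
--             for num_inner, color_inner in contains[color_outer]:
--                 next_bag = (num_outer * num_inner, color_inner)
--                 queue.append(next_bag)
--     return num_contained_bags
-- ===== SOURCE B (Python) =====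
-- def find_number_of_contained_bags(contains, color):
--     # bottom-up value iteration: after t rounds val[c] = bags inside c along paths of length <= t;
--     # len(contains) + 1 rounds reach the fixpoint on an acyclic graph
--     val = {}
--     for _ in range(len(contains) + 1):
--         val = {c: sum(n * (1 + val.get(i, 0)) for n, i in children)
--                for c, children in contains.items()}
--     return sum(n * (1 + val.get(i, 0)) for n, i in contains.get(color, []))
-- ===== Notes on version B (the rewrite author's own statement) =====
-- stated objective: alternative
-- what changed: Replaces A's breadth-first enumeration of all bag paths (queue of (multiplier, color) pairs, level-sized pop loop, -1 initial accumulator) by bottom-up value iteration: len(contains)+1 rounds of a dict comprehension computing val[c] = sum(n*(1+val.get(i,0))), then one final sum over color's children.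
import Mathlib
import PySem

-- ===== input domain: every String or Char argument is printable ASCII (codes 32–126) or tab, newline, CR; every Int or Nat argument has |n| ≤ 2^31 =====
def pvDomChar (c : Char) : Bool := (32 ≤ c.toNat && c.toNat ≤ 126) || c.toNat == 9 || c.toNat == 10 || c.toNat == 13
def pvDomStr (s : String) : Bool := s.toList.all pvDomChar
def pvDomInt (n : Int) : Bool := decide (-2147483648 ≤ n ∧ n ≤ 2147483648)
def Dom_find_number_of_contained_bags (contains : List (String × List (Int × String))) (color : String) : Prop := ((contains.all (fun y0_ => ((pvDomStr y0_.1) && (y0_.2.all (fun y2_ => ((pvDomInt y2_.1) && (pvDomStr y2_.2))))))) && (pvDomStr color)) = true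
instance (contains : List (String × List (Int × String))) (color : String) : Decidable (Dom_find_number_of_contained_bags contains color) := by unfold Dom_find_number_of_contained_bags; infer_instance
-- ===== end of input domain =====

-- B replaces A's breadth-first path enumeration by bottom-up value iteration (a rounds-based
-- dynamic program); on a cycle reachable from color A loops forever, and Pre_ excludes exactly
-- those inputs (plus duplicate-key lists, which do not arise from a Python dict).  A's Lean port
-- carries a fuel argument (contains.length + 2) that only makes the identical computation total:
-- under Pre_ the BFS empties its queue strictly within that fuel.

-- ===== PORT A =====
-- one body of A's `for _ in range(size)` loop: pop (num_outer, color_outer), add num_outer,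
-- and (if the color is a key) append the scaled inner bags to the next queue
def pvStepA (contains : List (String × List (Int × String))) (st : Int × List (Int × String))
    (b : Int × String) : Int × List (Int × String) :=
  let st' := (st.1 + b.1, st.2)
  if (PySem.Dict.mk contains).contains b.2 then
    (st'.1, st'.2 ++ (((PySem.Dict.mk contains).getD b.2 []).map (fun p => (b.1 * p.1, p.2))))
  else st'

-- A's `while True` loop; each fuel step processes one whole level (Python pops exactly
-- `size = len(queue)` elements, so the appended children form the next level's queue)
def pvLoopA (contains : List (String × List (Int × String))) : Nat → List (Int × String) → Int → Int
  | 0, _, acc => acc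
  | f + 1, q, acc =>
    if q = [] then acc
    else
      let r := q.foldl (pvStepA contains) (acc, [])
      pvLoopA contains f r.2 r.1

def find_number_of_contained_bags (contains : List (String × List (Int × String))) (color : String) : Int :=
  pvLoopA contains (contains.length + 2) [(1, color)] (-1)

-- ===== PORT B =====
-- Source B's dict comprehension {c: sum(n * (1 + val.get(i, 0)) for n, i in children) for c, children in contains.items()}
def pvRoundB (contains : List (String × List (Int × String))) (val : PySem.Dict String Int) : PySem.Dict String Int :=
  contains.foldl
    (fun d e => d.insert e.1 ((e.2.map (fun p => p.1 * (1 + val.getD p.2 0))).sum))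
    PySem.Dict.empty

-- Source B's `for _ in range(len(contains) + 1): val = {...}` loop, as iteration count -> val
def pvIterB (contains : List (String × List (Int × String))) : Nat → PySem.Dict String Int
  | 0 => PySem.Dict.empty
  | t + 1 => pvRoundB contains (pvIterB contains t)

def find_number_of_contained_bags_alt (contains : List (String × List (Int × String))) (color : String) : Int :=
  let val := pvIterB contains (contains.length + 1)
  (((PySem.Dict.mk contains).getD color []).map (fun p => p.1 * (1 + val.getD p.2 0))).sum

-- ===== PRECONDITION & SPEC =====
def pvSuccs (contains : List (String × List (Int × String))) (c : String) : List (Int × String) :=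
  (PySem.Dict.mk contains).getD c []

-- pvReach f a b = "b is reachable from a in 1..f edge steps of the contains-graph"
def pvReach (contains : List (String × List (Int × String))) : Nat → String → String → Bool
  | 0, _, _ => false
  | f + 1, a, b => (pvSuccs contains a).any (fun p => p.2 == b || pvReach contains f p.2 b)

-- Pre_ excludes (a) association lists with duplicate keys, which do not represent a Python dict
-- (A's argument is a dict, whose keys are unique), and (b) inputs with a cycle reachable from
-- color, on which A never returns (its queue never empties).
def Pre_find_number_of_contained_bags (contains : List (String × List (Int × String))) (color : String) : Prop :=
  (contains.map (fun p => p.1)).Nodup ∧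
  ∀ p ∈ contains, (p.1 = color ∨ pvReach contains contains.length color p.1 = true) →
    pvReach contains contains.length p.1 p.1 = false

instance (contains : List (String × List (Int × String))) (color : String) : Decidable (Pre_find_number_of_contained_bags contains color) := by unfold Pre_find_number_of_contained_bags; infer_instance

def pvWitness_find_number_of_contained_bags : (List (String × List (Int × String))) × String :=
  ([("a", [(2, "b")]), ("b", [])], "a")

def Spec_find_number_of_contained_bags (contains : List (String × List (Int × String))) (color : String) (out : Int) : Prop := out = find_number_of_contained_bags_alt contains color
instance (contains : List (String × List (Int × String))) (color : String) (out : Int) : Decidable (Spec_find_number_of_contained_bags contains color out) := by unfold Spec_find_number_of_contained_bags; infer_instance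

-- ===== CLAIM (what is proved, stated in full; the proofs are below) =====
def Claim_equal_find_number_of_contained_bags : Prop := ∀ (contains : List (String × List (Int × String))) (color : String), Dom_find_number_of_contained_bags contains color → Pre_find_number_of_contained_bags contains color → Spec_find_number_of_contained_bags contains color (find_number_of_contained_bags contains color)

-- ===== LEMMAS AND PROOFS =====
-- pvNext is one BFS level of A (what a whole pass of the `for _ in range(size)` loop enqueues);
-- pvVal f q is B's valuation of a queue; pvE is the edge relation of the contains-graph.
-- pvCntB f c = bags contained in c counted along paths of length < f (the common value both
-- ports are reduced to: A reaches it level by level, B round by round)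
def pvCntB (contains : List (String × List (Int × String))) : Nat → String → Int
  | 0, _ => 0
  | f + 1, c => (((PySem.Dict.mk contains).getD c []).map (fun p => p.1 * (1 + pvCntB contains f p.2))).sum

def pvNext (contains : List (String × List (Int × String))) (q : List (Int × String)) : List (Int × String) :=
  q.flatMap (fun b => (pvSuccs contains b.2).map (fun p => (b.1 * p.1, p.2)))

def pvWsum (q : List (Int × String)) : Int := (q.map (·.1)).sum

def pvVal (contains : List (String × List (Int × String))) (f : Nat) (q : List (Int × String)) : Int :=
  (q.map (fun b => b.1 * (1 + pvCntB contains f b.2))).sum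

def pvE (contains : List (String × List (Int × String))) (a b : String) : Prop :=
  ∃ m, (m, b) ∈ pvSuccs contains a

theorem pv_succs_of_not_contains (contains : List (String × List (Int × String))) (c : String)
    (h : (PySem.Dict.mk contains).contains c = false) : pvSuccs contains c = [] := by
  simpa [pvSuccs] using PySem.Dict.getD_of_not_contains (PySem.Dict.mk contains) ([] : List (Int × String)) h

theorem pv_foldA (contains : List (String × List (Int × String))) :
    ∀ (q : List (Int × String)) (acc : Int) (w : List (Int × String)),
      q.foldl (pvStepA contains) (acc, w) = (acc + pvWsum q, w ++ pvNext contains q) := by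
  intro q
  induction q with
  | nil => intro acc w; simp [pvWsum, pvNext]
  | cons b t ih =>
    intro acc w
    by_cases hc : (PySem.Dict.mk contains).contains b.2 = true
    · simp only [List.foldl_cons, pvStepA, hc, if_pos]
      rw [ih]
      simp [pvWsum, pvNext, pvSuccs, add_assoc, List.append_assoc]
    · have hs := pv_succs_of_not_contains contains b.2 (by simp only [Bool.not_eq_true] at hc; exact hc)
      simp only [List.foldl_cons, pvStepA, hc]
      rw [ih]
      simp [pvWsum, pvNext, hs, add_assoc]


theorem pvVal_nil (contains : List (String × List (Int × String))) (f : Nat) :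
    pvVal contains f [] = 0 := rfl

theorem pvVal_cons (contains : List (String × List (Int × String))) (f : Nat)
    (b : Int × String) (t : List (Int × String)) :
    pvVal contains f (b :: t) = b.1 * (1 + pvCntB contains f b.2) + pvVal contains f t := by
  simp [pvVal]

theorem pvVal_append (contains : List (String × List (Int × String))) (f : Nat)
    (q r : List (Int × String)) :
    pvVal contains f (q ++ r) = pvVal contains f q + pvVal contains f r := by
  simp [pvVal]

theorem pvNext_cons (contains : List (String × List (Int × String)))
    (b : Int × String) (t : List (Int × String)) :
    pvNext contains (b :: t)
      = (pvSuccs contains b.2).map (fun p => (b.1 * p.1, p.2)) ++ pvNext contains t := by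
  simp [pvNext]

theorem pvVal_scaled (contains : List (String × List (Int × String))) (f : Nat)
    (n : Int) (c : String) :
    pvVal contains f ((pvSuccs contains c).map (fun p => (n * p.1, p.2)))
      = n * pvCntB contains (f + 1) c := by
  simp only [pvVal, List.map_map, pvCntB, pvSuccs]
  rw [← List.sum_map_mul_left]
  refine congrArg List.sum (List.map_congr_left ?_)
  intro p _
  simp [mul_assoc]

theorem pv_val_succ (contains : List (String × List (Int × String))) (f : Nat) :
    ∀ q : List (Int × String),
      pvVal contains (f + 1) q = pvWsum q + pvVal contains f (pvNext contains q) := by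
  intro q
  induction q with
  | nil => simp [pvVal, pvWsum, pvNext]
  | cons b t ih =>
    rw [pvVal_cons, pvNext_cons, pvVal_append, pvVal_scaled, ih]
    simp only [pvWsum, List.map_cons, List.sum_cons]
    ring

theorem pv_loopA (contains : List (String × List (Int × String))) :
    ∀ (f : Nat) (q : List (Int × String)) (acc : Int),
      (pvNext contains)^[f] q = [] →
      pvLoopA contains f q acc = acc + pvVal contains f q := by
  intro f
  induction f with
  | zero => intro q acc h; simp at h; subst h; simp [pvLoopA, pvVal_nil]
  | succ f ih =>
    intro q acc h
    by_cases hq : q = []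
    · subst hq; simp [pvLoopA, pvVal_nil]
    · rw [pvLoopA, if_neg hq, pv_foldA]
      rw [Function.iterate_succ_apply] at h
      show pvLoopA contains f ([] ++ pvNext contains q) (acc + pvWsum q)
          = acc + pvVal contains (f + 1) q
      rw [List.nil_append, ih _ _ h, pv_val_succ]
      ring

theorem pv_edge_key (contains : List (String × List (Int × String))) (a b : String)
    (h : pvE contains a b) : a ∈ contains.map (fun p => p.1) := by
  by_contra hmem
  have hc : (PySem.Dict.mk contains).contains a = false := by
    rw [PySem.Dict.contains_eq_decide_mem_keys]
    simp only [PySem.Dict.keys_mk, decide_eq_false_iff_not]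
    exact hmem
  obtain ⟨m, hm⟩ := h
  rw [pv_succs_of_not_contains contains a hc] at hm
  exact absurd hm (List.not_mem_nil)

theorem pv_iter_chain (contains : List (String × List (Int × String))) (color : String) :
    ∀ (l : Nat) (b : Int × String), b ∈ (pvNext contains)^[l] [(1, color)] →
      ∃ L : List String, L.IsChain (pvE contains) ∧ L.length = l + 1 ∧
        L.head? = some color ∧ L.getLast? = some b.2 := by
  intro l
  induction l with
  | zero =>
    intro b hb
    simp only [Function.iterate_zero, id_eq, List.mem_singleton] at hb
    subst hb
    exact ⟨[color], List.isChain_singleton _, by simp, by simp, by simp⟩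
  | succ l ih =>
    intro b hb
    rw [Function.iterate_succ_apply'] at hb
    simp only [pvNext, List.mem_flatMap, List.mem_map] at hb
    obtain ⟨a, ha, p, hp, hpb⟩ := hb
    obtain ⟨L, hch, hlen, hhead, hlast⟩ := ih a ha
    have hb2 : b.2 = p.2 := by rw [← hpb]
    refine ⟨L ++ [b.2], ?_, by simp [hlen], ?_, List.getLast?_concat⟩
    · refine hch.append (List.isChain_singleton _) ?_
      intro x hx y hy
      simp only [List.head?_cons, Option.mem_def, Option.some.injEq] at hy
      subst hy
      rw [hlast] at hx
      simp only [Option.mem_def, Option.some.injEq] at hx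
      subst hx
      exact ⟨p.1, by rw [hb2]; simpa using hp⟩
    · rw [List.head?_append, hhead]
      rfl

theorem pv_reach_of_chain (contains : List (String × List (Int × String))) (L : List String)
    (hch : L.IsChain (pvE contains)) :
    ∀ (f i j : Nat) (hij : i < j) (hj : j < L.length), j - i ≤ f →
      pvReach contains f (L[i]'(Nat.lt_trans hij hj)) (L[j]'hj) = true := by
  intro f
  induction f with
  | zero => intro i j hij hj hle; omega
  | succ f ih =>
    intro i j hij hj hle
    have hi1 : i + 1 < L.length := by omega
    obtain ⟨m, hm⟩ := (List.isChain_iff_getElem.1 hch) i hi1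
    rw [pvReach]
    rw [List.any_eq_true]
    refine ⟨(m, L[i+1]'hi1), hm, ?_⟩
    by_cases hj1 : i + 1 = j
    · subst hj1
      simp
    · have := ih (i+1) j (by omega) hj (by omega)
      simp only [Bool.or_eq_true]
      right
      exact this

theorem pv_dup (N : List String) (keys : List String) (hlen : keys.length < N.length)
    (hsub : ∀ x ∈ N, x ∈ keys) :
    ∃ (i j : Nat) (hj : j < N.length) (hij : i < j), N[i]'(Nat.lt_trans hij hj) = N[j]'hj := by
  have hnd : ¬ N.Nodup := by
    intro hnd
    have h1 : N.toFinset.card = N.length := List.toFinset_card_of_nodup hnd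
    have h2 : N.toFinset ⊆ keys.toFinset := by
      intro x hx
      rw [List.mem_toFinset] at *
      exact hsub x hx
    have h3 := Finset.card_le_card h2
    have h4 := List.toFinset_card_le keys
    omega
  rw [List.nodup_iff_injective_get] at hnd
  simp only [Function.Injective, not_forall] at hnd
  obtain ⟨a, b, hab, hne⟩ := hnd
  rcases Nat.lt_or_ge a.1 b.1 with h | h
  · exact ⟨a.1, b.1, b.2, h, by simpa [List.get_eq_getElem] using hab⟩
  · have h' : b.1 < a.1 := by
      rcases Nat.lt_or_ge b.1 a.1 with h' | h'
      · exact h'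
      · exact absurd (Fin.ext (Nat.le_antisymm h' h)) hne
    exact ⟨b.1, a.1, a.2, h', by simpa [List.get_eq_getElem] using hab.symm⟩

theorem pv_head_zero (L : List String) (c : String) (h : L.head? = some c)
    (h0 : 0 < L.length) : L[0]'h0 = c := by
  cases L with
  | nil => simp at h0
  | cons x t =>
    simp only [List.head?_cons, Option.some.injEq] at h
    simpa using h

theorem pv_dies (contains : List (String × List (Int × String))) (color : String)
    (hpre : Pre_find_number_of_contained_bags contains color) :
    (pvNext contains)^[contains.length + 2] [(1, color)] = [] := by
  have h1 : (pvNext contains)^[contains.length + 1] [(1, color)] = [] := by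
    by_contra hne
    obtain ⟨b, hb⟩ := List.exists_mem_of_ne_nil _ hne
    obtain ⟨L, hch, hlen, hhead, hlast⟩ := pv_iter_chain contains color _ b hb
    have hNlen : L.dropLast.length = contains.length + 1 := by
      simp [hlen]
    have hkey : ∀ (i : Nat) (hi : i + 1 < L.length),
        (L[i]'(Nat.lt_of_succ_lt hi)) ∈ contains.map (fun p => p.1) := by
      intro i hi
      exact pv_edge_key contains _ _ ((List.isChain_iff_getElem.1 hch) i hi)
    have hsub : ∀ x ∈ L.dropLast, x ∈ contains.map (fun p => p.1) := by
      intro x hx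
      obtain ⟨i, hi, rfl⟩ := List.mem_iff_getElem.1 hx
      rw [List.getElem_dropLast]
      exact hkey i (by omega)
    obtain ⟨i, j, hj, hij, heq⟩ := pv_dup L.dropLast (contains.map (fun p => p.1))
      (by simp [hNlen]) hsub
    rw [List.getElem_dropLast, List.getElem_dropLast] at heq
    have hjL : j < L.length := by omega
    have hiL : i < L.length := by omega
    have hi1 : i + 1 < L.length := by
      rw [hNlen] at hj
      omega
    obtain ⟨p, hpmem, hpa⟩ := List.mem_map.1 (hkey i hi1)
    have hcond : p.1 = color ∨ pvReach contains contains.length color p.1 = true := by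
      rcases Nat.eq_zero_or_pos i with hi0 | hipos
      · left
        subst hi0
        rw [hpa]
        exact pv_head_zero L color hhead (by omega)
      · right
        rw [hpa, ← pv_head_zero L color hhead (by omega)]
        exact pv_reach_of_chain contains L hch contains.length 0 i hipos hiL
          (by rw [hNlen] at hj; omega)
    have hcyc := pv_reach_of_chain contains L hch contains.length i j hij hjL
      (by rw [hNlen] at hj; omega)
    have hfalse := hpre.2 p hpmem hcond
    rw [hpa] at hfalse
    rw [← heq] at hcyc
    rw [hfalse] at hcyc
    exact Bool.false_ne_true hcyc
  rw [Function.iterate_succ_apply', h1]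
  rfl

theorem pv_mk_getD_of_mem (contains : List (String × List (Int × String)))
    (hnd : (contains.map (fun p => p.1)).Nodup) (e : String × List (Int × String))
    (he : e ∈ contains) : (PySem.Dict.mk contains).getD e.1 [] = e.2 := by
  have hmem : (e.1, e.2) ∈ (PySem.Dict.mk contains).items := by simpa using he
  exact PySem.Dict.getD_of_mem_items (PySem.Dict.mk contains) hmem
    (by simpa [PySem.Dict.keys] using hnd) []

theorem pv_mk_getD_of_not_mem (contains : List (String × List (Int × String))) (c : String)
    (hc : c ∉ contains.map (fun p => p.1)) : (PySem.Dict.mk contains).getD c [] = [] := by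
  refine PySem.Dict.getD_of_not_contains _ _ ?_
  rw [PySem.Dict.contains_eq_decide_mem_keys]
  simp only [PySem.Dict.keys_mk, decide_eq_false_iff_not]
  exact hc

theorem pvRoundB_items (contains : List (String × List (Int × String)))
    (val : PySem.Dict String Int) (hnd : (contains.map (fun p => p.1)).Nodup) :
    (pvRoundB contains val).items
      = contains.map (fun e => (e.1, (e.2.map (fun p => p.1 * (1 + val.getD p.2 0))).sum)) := by
  have h := PySem.Dict.items_foldl_insert_fresh (ν := Int) contains (fun e => e.1)
    (fun e => (e.2.map (fun p => p.1 * (1 + val.getD p.2 0))).sum) PySem.Dict.empty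
    (fun a _ => PySem.Dict.contains_empty a.1) hnd
  simpa [pvRoundB] using h

theorem pvRoundB_getD_mem (contains : List (String × List (Int × String)))
    (val : PySem.Dict String Int) (hnd : (contains.map (fun p => p.1)).Nodup)
    (e : String × List (Int × String)) (he : e ∈ contains) :
    (pvRoundB contains val).getD e.1 0
      = (e.2.map (fun p => p.1 * (1 + val.getD p.2 0))).sum := by
  refine PySem.Dict.getD_of_mem_items (pvRoundB contains val) ?_ ?_ 0
  · rw [pvRoundB_items contains val hnd]
    exact List.mem_map.2 ⟨e, he, rfl⟩
  · simp only [PySem.Dict.keys, pvRoundB_items contains val hnd, List.map_map]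
    simpa [Function.comp] using hnd

theorem pvRoundB_getD_not_mem (contains : List (String × List (Int × String)))
    (val : PySem.Dict String Int) (hnd : (contains.map (fun p => p.1)).Nodup)
    (c : String) (hc : c ∉ contains.map (fun p => p.1)) :
    (pvRoundB contains val).getD c 0 = 0 := by
  refine PySem.Dict.getD_of_not_contains _ _ ?_
  rw [PySem.Dict.contains_eq_decide_mem_keys]
  simp only [PySem.Dict.keys, pvRoundB_items contains val hnd, List.map_map,
    decide_eq_false_iff_not]
  simpa [Function.comp] using hc

theorem pvIterB_getD (contains : List (String × List (Int × String)))
    (hnd : (contains.map (fun p => p.1)).Nodup) :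
    ∀ (t : Nat) (c : String), (pvIterB contains t).getD c 0 = pvCntB contains t c := by
  intro t
  induction t with
  | zero => intro c; simp [pvIterB, pvCntB, PySem.Dict.getD_empty]
  | succ t ih =>
    intro c
    by_cases hc : c ∈ contains.map (fun p => p.1)
    · obtain ⟨e, he, hec⟩ := List.mem_map.1 hc
      subst hec
      rw [pvIterB, pvRoundB_getD_mem contains _ hnd e he, pvCntB,
        pv_mk_getD_of_mem contains hnd e he]
      refine congrArg List.sum (List.map_congr_left ?_)
      intro p _
      rw [ih]
    · rw [pvIterB, pvRoundB_getD_not_mem contains _ hnd c hc, pvCntB,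
        pv_mk_getD_of_not_mem contains c hc]
      rfl

theorem pv_alt_eq (contains : List (String × List (Int × String))) (color : String)
    (hnd : (contains.map (fun p => p.1)).Nodup) :
    find_number_of_contained_bags_alt contains color
      = pvCntB contains (contains.length + 2) color := by
  show (((PySem.Dict.mk contains).getD color []).map
      (fun p => p.1 * (1 + (pvIterB contains (contains.length + 1)).getD p.2 0))).sum = _
  rw [show contains.length + 2 = (contains.length + 1) + 1 from rfl, pvCntB]
  refine congrArg List.sum (List.map_congr_left ?_)
  intro p _
  rw [pvIterB_getD contains hnd]

-- ===== VERDICT (by name: the statement is the Claim_ definition above) =====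
theorem find_number_of_contained_bags_spec : Claim_equal_find_number_of_contained_bags := by
  intro contains color _hdom hpre
  show find_number_of_contained_bags contains color = find_number_of_contained_bags_alt contains color
  rw [pv_alt_eq contains color hpre.1, find_number_of_contained_bags,
    pv_loopA contains (contains.length + 2) [(1, color)] (-1) (pv_dies contains color hpre)]
  simp [pvVal]
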